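-- pv_equiv track=rewrite | github.com/Glasssparrow/heroes5_battle_calculator_prototype | code/decisionmaker/distance_and_visualisation.py | get_visualisation
-- ===== SOURCE A (Python) =====
-- def get_visualisation(position1, position2):
--     visualisation = ""
--     for x in range(21):
--         if x == position1-1:
--             visualisation += "0"
--         elif x == position2-1:
--             visualisation += "1"
--         else:
--             visualisation += "."
--     return visualisation
-- ===== SOURCE B (Python) =====
-- def get_visualisation(position1, position2):
--     chars = ['.'] * 21
--     if 1 <= position2 <= 21:
--         chars[position2 - 1] = '1'
--     if 1 <= position1 <= 21:
--         chars[position1 - 1] = '0'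
--     return ''.join(chars)
-- ===== Notes on version B (the rewrite author's own statement) =====
-- stated objective: simpler
-- what changed: Replaces the 21-iteration comparison loop with direct index placement into a 21-slot buffer ('.'*21), writing position2 then position1 so position1 wins ties, then joining.
import Mathlib
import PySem

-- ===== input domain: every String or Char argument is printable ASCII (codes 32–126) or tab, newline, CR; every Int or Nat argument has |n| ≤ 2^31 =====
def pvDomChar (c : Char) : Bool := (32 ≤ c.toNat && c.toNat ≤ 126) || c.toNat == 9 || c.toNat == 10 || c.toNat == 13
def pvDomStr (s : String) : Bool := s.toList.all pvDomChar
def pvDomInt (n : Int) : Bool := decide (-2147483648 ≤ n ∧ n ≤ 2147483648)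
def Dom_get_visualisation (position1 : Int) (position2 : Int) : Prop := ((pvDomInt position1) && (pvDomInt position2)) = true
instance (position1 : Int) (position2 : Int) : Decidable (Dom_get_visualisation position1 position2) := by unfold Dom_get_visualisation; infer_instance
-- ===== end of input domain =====

-- B replaces A's 21-step comparison loop by direct index placement into a buffer of 21 dots (simpler).

-- ===== PORT A =====
def get_visualisation (position1 : Int) (position2 : Int) : String :=
  (PySem.List.pyRange 0 21 1).foldl (fun visualisation x =>
    if x = position1 - 1 then visualisation ++ "0"
    else if x = position2 - 1 then visualisation ++ "1"
    else visualisation ++ ".") ""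

-- ===== PORT B =====
def get_visualisation_alt (position1 : Int) (position2 : Int) : String :=
  let chars := List.replicate 21 '.'
  let chars := if 1 ≤ position2 ∧ position2 ≤ 21 then chars.set (position2 - 1).toNat '1' else chars
  let chars := if 1 ≤ position1 ∧ position1 ≤ 21 then chars.set (position1 - 1).toNat '0' else chars
  String.mk chars

-- ===== PRECONDITION & SPEC =====
def Spec_get_visualisation (position1 : Int) (position2 : Int) (out : String) : Prop := out = get_visualisation_alt position1 position2
instance (position1 : Int) (position2 : Int) (out : String) : Decidable (Spec_get_visualisation position1 position2 out) := by unfold Spec_get_visualisation; infer_instance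

-- ===== CLAIM (what is proved, stated in full; the proofs are below) =====
def Claim_equal_get_visualisation : Prop := ∀ (position1 : Int) (position2 : Int), Dom_get_visualisation position1 position2 → Spec_get_visualisation position1 position2 (get_visualisation position1 position2)

-- ===== LEMMAS AND PROOFS =====

/-- the character A places at loop index `x` -/
def pvCell (a b x : Int) : Char :=
  if x = a - 1 then '0' else if x = b - 1 then '1' else '.'

theorem fold_chars (a b : Int) (l : List Int) (s : String) :
    l.foldl (fun visualisation x =>
      if x = a - 1 then visualisation ++ "0"
      else if x = b - 1 then visualisation ++ "1"
      else visualisation ++ ".") s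
    = String.mk (s.toList ++ l.map (pvCell a b)) := by
  induction l generalizing s with
  | nil => simp only [List.foldl_nil, List.map_nil, List.append_nil]; exact String.ofList_toList.symm
  | cons x xs ih =>
    simp only [List.foldl_cons, List.map_cons, pvCell]
    split_ifs with h1 h2 <;>
      simp [ih, String.toList_append] <;> rfl

theorem A_eq (a b : Int) :
    get_visualisation a b = String.mk ((List.range 21).map (fun n : Nat => pvCell a b (n : Int))) := by
  rw [get_visualisation, fold_chars, PySem.List.pyRange_one]
  norm_num [List.map_map, Function.comp_def, show (21:Int).toNat = 21 from rfl]

theorem B_chars (a b : Int) :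
    ((List.range 21).map (fun n : Nat => pvCell a b (n : Int)))
    = (let chars := List.replicate 21 '.'
       let chars := if 1 ≤ b ∧ b ≤ 21 then chars.set (b - 1).toNat '1' else chars
       if 1 ≤ a ∧ a ≤ 21 then chars.set (a - 1).toNat '0' else chars) := by
  apply List.ext_getElem
  · simp; split_ifs <;> simp
  · intro i h1 h2
    simp only [List.getElem_map, List.getElem_range]
    have hi : i < 21 := by simpa using h1
    unfold pvCell
    split_ifs with g1 g2 <;>
      split_ifs <;>
      simp only [List.getElem_set, List.getElem_replicate] <;>
      (try split_ifs) <;> first | rfl | omega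

-- ===== VERDICT (by name: the statement is the Claim_ definition above) =====
theorem get_visualisation_spec : Claim_equal_get_visualisation := by
  intro a b _
  show get_visualisation a b = get_visualisation_alt a b
  rw [A_eq, B_chars, get_visualisation_alt]
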